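-- pv_equiv track=rewrite | github.com/experiencenow-ai/infra | modules/episodic_memory.py | _compress_older_wakes
-- ===== SOURCE A (Python) =====
-- from typing import List, Dict, Optional
--
-- def _compress_older_wakes(entries: List[dict]) -> str:
--     """
--     Heavily compress older wakes into activity overview.
--
--     Returns something like:
--     "Jan 10-15: 45 wakes - 20 CODE, 15 DESIGN, 5 LIBRARY, 5 other"
--     """
--     if not entries:
--         return ""
--
--     # Group by date
--     by_date = {}
--     for entry in entries:
--         date = entry.get("timestamp", "")[:10]
--         if date not in by_date:
--             by_date[date] = []
--         by_date[date].append(entry)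
--
--     lines = []
--     for date in sorted(by_date.keys(), reverse=True)[:7]:  # Last 7 days only
--         day_entries = by_date[date]
--
--         # Count actions
--         action_counts = {}
--         for e in day_entries:
--             action = e.get("action", "?")
--             action_counts[action] = action_counts.get(action, 0) + 1
--
--         # Format
--         top_actions = sorted(action_counts.items(), key=lambda x: -x[1])[:4]
--         action_str = ", ".join(f"{c}x{a}" for a, c in top_actions)
--
--         lines.append(f"{date}: {len(day_entries)} wakes - {action_str}")
--
--     if len(by_date) > 7:
--         lines.append(f"...and {len(by_date) - 7} earlier days")
--
--     return "\n".join(lines)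
-- ===== SOURCE B (Python) =====
-- def _compress_older_wakes(entries):
--     """Dedup-dates + per-date filter/count re-implementation (no dict-of-lists grouping)."""
--     if not entries:
--         return ""
--
--     distinct_dates = list(dict.fromkeys(e.get("timestamp", "")[:10] for e in entries))
--
--     def day_line(date):
--         day_actions = [e.get("action", "?") for e in entries
--                        if e.get("timestamp", "")[:10] == date]
--         seen = list(dict.fromkeys(day_actions))
--         top = sorted(((a, day_actions.count(a)) for a in seen),
--                      key=lambda x: -x[1])[:4]
--         action_str = ", ".join(f"{c}x{a}" for a, c in top)
--         return f"{date}: {len(day_actions)} wakes - {action_str}"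
--
--     lines = [day_line(d) for d in sorted(distinct_dates, reverse=True)[:7]]
--     if len(distinct_dates) > 7:
--         lines.append(f"...and {len(distinct_dates) - 7} earlier days")
--     return "\n".join(lines)
-- ===== Notes on version B (the rewrite author's own statement) =====
-- stated objective: alternative
-- what changed: Replaces A's dict-of-lists date grouping and per-day counting dicts with an ordered dedup of date keys, a per-date filter pass, and list.count for action tallies (same stable ordering and tie-breaking).
import Mathlib
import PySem

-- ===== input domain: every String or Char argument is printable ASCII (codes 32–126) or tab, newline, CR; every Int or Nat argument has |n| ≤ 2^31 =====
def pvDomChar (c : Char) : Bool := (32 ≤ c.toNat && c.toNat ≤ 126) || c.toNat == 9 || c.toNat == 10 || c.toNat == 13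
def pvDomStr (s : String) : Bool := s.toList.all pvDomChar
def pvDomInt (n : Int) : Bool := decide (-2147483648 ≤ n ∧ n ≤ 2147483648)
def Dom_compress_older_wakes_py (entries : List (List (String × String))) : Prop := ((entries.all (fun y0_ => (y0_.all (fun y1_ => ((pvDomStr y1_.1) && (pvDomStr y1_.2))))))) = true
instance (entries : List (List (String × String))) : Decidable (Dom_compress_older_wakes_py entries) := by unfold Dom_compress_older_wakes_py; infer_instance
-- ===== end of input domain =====

-- B replaces A's dict-of-lists grouping and per-day counting dicts by ordered dedup of the
-- date keys plus a per-date filter with list.count — a different decomposition, not faster.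

-- shared helpers: entry.get("timestamp","")[:10] and entry.get("action","?")
def pvDate (e : List (String × String)) : String :=
  PySem.Str.slice ((PySem.Dict.mk e).getD "timestamp" "") none (some 10)
def pvAction (e : List (String × String)) : String :=
  (PySem.Dict.mk e).getD "action" "?"

-- ===== PORT A =====
def compress_older_wakes_py (entries : List (List (String × String))) : String :=
  if entries = [] then ""
  else
    -- by_date: 'if date not in by_date: by_date[date] = []' then append
    let by_date : PySem.Dict String (List (List (String × String))) :=
      entries.foldl (fun d entry =>
        let date := pvDate entry
        let d' := if d.contains date then d else d.insert date []
        d'.modify date [] (fun l => l ++ [entry])) PySem.Dict.empty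
    let lines : List String :=
      (PySem.List.slice (PySem.List.sorted by_date.keys (fun x => x) true) none (some 7)).foldl
        (fun lines date =>
          let day_entries := by_date.getD date []
          let action_counts : PySem.Dict String Int :=
            day_entries.foldl (fun d e =>
              let action := pvAction e
              d.insert action (d.getD action 0 + 1)) PySem.Dict.empty
          let top_actions := PySem.List.slice
            (PySem.List.sorted action_counts.items (fun x => -x.2) false) none (some 4)
          let action_str := PySem.Str.join ", "
            (top_actions.map (fun p => PySem.Int.toStr p.2 ++ "x" ++ p.1))
          lines ++ [date ++ ": " ++ PySem.Int.toStr (day_entries.length : Int)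
                      ++ " wakes - " ++ action_str]) []
    let lines := if ((by_date.size : Int) > 7)
      then lines ++ ["...and " ++ PySem.Int.toStr ((by_date.size : Int) - 7) ++ " earlier days"]
      else lines
    PySem.Str.join "\n" lines

-- ===== PORT B =====
def pvDayLine (entries : List (List (String × String))) (date : String) : String :=
  let day_actions := (entries.filter (fun e => pvDate e == date)).map pvAction
  let seen := PySem.List.dedup day_actions
  let top := PySem.List.slice
    (PySem.List.sorted (seen.map (fun a => (a, (day_actions.count a : Int))))
      (fun x => -x.2) false) none (some 4)
  let action_str := PySem.Str.join ", " (top.map (fun p => PySem.Int.toStr p.2 ++ "x" ++ p.1))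
  date ++ ": " ++ PySem.Int.toStr (day_actions.length : Int) ++ " wakes - " ++ action_str

def compress_older_wakes_py_alt (entries : List (List (String × String))) : String :=
  if entries = [] then ""
  else
    let distinct_dates := PySem.List.dedup (entries.map pvDate)
    let lines :=
      (PySem.List.slice (PySem.List.sorted distinct_dates (fun x => x) true) none (some 7)).map
        (pvDayLine entries)
    let lines := if ((distinct_dates.length : Int) > 7)
      then lines ++ ["...and " ++ PySem.Int.toStr ((distinct_dates.length : Int) - 7) ++ " earlier days"]
      else lines
    PySem.Str.join "\n" lines

-- ===== PRECONDITION & SPEC =====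
def Spec_compress_older_wakes_py (entries : List (List (String × String))) (out : String) : Prop := out = compress_older_wakes_py_alt entries
instance (entries : List (List (String × String))) (out : String) : Decidable (Spec_compress_older_wakes_py entries out) := by unfold Spec_compress_older_wakes_py; infer_instance

-- ===== CLAIM (what is proved, stated in full; the proofs are below) =====
def Claim_equal_compress_older_wakes_py : Prop := ∀ (entries : List (List (String × String))), Dom_compress_older_wakes_py entries → Spec_compress_older_wakes_py entries (compress_older_wakes_py entries)

-- ===== LEMMAS AND PROOFS =====

-- the 'if absent: d[k]=[]; d[k].append(v)' step is one modify
theorem pv_step_eq {κ ν : Type} [BEq κ] [LawfulBEq κ] (d : PySem.Dict κ ν) (k : κ)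
    (v : ν) (f : ν → ν) :
    (if d.contains k then d else d.insert k v).modify k v f = d.modify k v f := by
  by_cases h : d.contains k = true
  · simp [h]
  · simp only [h, Bool.false_eq_true, if_false]
    unfold PySem.Dict.modify
    rw [PySem.Dict.getD_insert_self, PySem.Dict.insert_insert_self,
        PySem.Dict.getD_of_not_contains d v (by simpa using h)]

-- A's grouping dict, characterized
theorem pv_by_date_eq (entries : List (List (String × String))) :
    entries.foldl (fun d entry =>
        let date := pvDate entry
        let d' := if d.contains date then d else d.insert date []
        d'.modify date [] (fun l => l ++ [entry])) PySem.Dict.empty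
      = (entries.map (fun e => (pvDate e, e))).foldl
          (fun d p => d.modify p.1 [] (fun l => l ++ [p.2])) PySem.Dict.empty := by
  rw [List.foldl_map]
  exact PySem.List.foldl_congr_mem entries _ _ PySem.Dict.empty
    (fun d e _ => pv_step_eq d (pvDate e) [] (fun l => l ++ [e]))

theorem pv_by_date_getD (entries : List (List (String × String))) (date : String) :
    ((entries.map (fun e => (pvDate e, e))).foldl
        (fun d p => d.modify p.1 [] (fun l => l ++ [p.2])) PySem.Dict.empty).getD date []
      = entries.filter (fun e => pvDate e == date) := by
  rw [PySem.Dict.getD_foldl_modify_append]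
  simp [List.filter_map, List.map_map, Function.comp_def]

theorem pv_by_date_keys (entries : List (List (String × String))) :
    ((entries.map (fun e => (pvDate e, e))).foldl
        (fun d p => d.modify p.1 [] (fun l => l ++ [p.2])) PySem.Dict.empty).keys
      = PySem.List.dedup (entries.map pvDate) := by
  rw [PySem.Dict.keys_foldl_modify_key (entries.map (fun e => (pvDate e, e)))
        (fun p => p.1) [] (fun _ p => fun l => l ++ [p.2]) PySem.Dict.empty]
  simp [PySem.Dict.keys_empty, PySem.Set.update_nil_left, PySem.List.dedup_eq_ofList,
        List.map_map, Function.comp_def]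

-- A's per-day counting dict is Counter(day_actions), so its items are B's (action, count) list
theorem pv_counts_items (day_entries : List (List (String × String))) :
    (day_entries.foldl (fun d e =>
        d.insert (pvAction e) (d.getD (pvAction e) 0 + 1)) PySem.Dict.empty).items
      = (PySem.List.dedup (day_entries.map pvAction)).map
          (fun a => (a, ((day_entries.map pvAction).count a : Int))) := by
  have h1 : day_entries.foldl (fun d e =>
        d.insert (pvAction e) (d.getD (pvAction e) 0 + 1)) PySem.Dict.empty
      = PySem.Dict.counter (day_entries.map pvAction) := by
    rw [← PySem.Dict.foldl_insert_getD_add_one_eq_counter, List.foldl_map]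
  rw [h1, PySem.Dict.items_counter, PySem.List.dedup_eq_ofList]

-- A's line for a date equals B's day_line
theorem pv_line_eq (entries : List (List (String × String))) (date : String) :
    date ++ ": "
      ++ PySem.Int.toStr (((entries.filter (fun e => pvDate e == date)).length : Int))
      ++ " wakes - "
      ++ PySem.Str.join ", "
        ((PySem.List.slice
          (PySem.List.sorted
            ((entries.filter (fun e => pvDate e == date)).foldl (fun d e =>
              d.insert (pvAction e) (d.getD (pvAction e) 0 + 1)) PySem.Dict.empty).items
            (fun x => -x.2) false) none (some 4)).map
          (fun p => PySem.Int.toStr p.2 ++ "x" ++ p.1))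
    = pvDayLine entries date := by
  simp only [pvDayLine, pv_counts_items, List.length_map]

theorem pv_size_eq {κ ν : Type} [BEq κ] (d : PySem.Dict κ ν) : d.size = d.keys.length := by
  simp [PySem.Dict.size, PySem.Dict.keys]

-- ===== VERDICT (by name: the statement is the Claim_ definition above) =====
theorem compress_older_wakes_py_spec : Claim_equal_compress_older_wakes_py := by
  intro entries _
  unfold Spec_compress_older_wakes_py compress_older_wakes_py compress_older_wakes_py_alt
  by_cases he : entries = []
  · simp [he]
  · simp only [he, if_false]
    rw [pv_by_date_eq]
    rw [PySem.List.foldl_append_singleton_eq_map, List.nil_append]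
    rw [pv_by_date_keys, pv_size_eq, pv_by_date_keys]
    simp only [pv_by_date_getD, pv_line_eq]
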